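-- pv_equiv track=rewrite | github.com/lamrotkassahun-afk/Shipping-a-Data-Product-From-Raw-Telegram-Data-to-an-Analytical-API | src/yolo_detect.py | categorize_image
-- ===== SOURCE A (Python) =====
-- def categorize_image(detections):
--     """
--     Categorizes the image based on detected objects.
--     - promotional: Person + Product
--     - product_display: Product, no Person
--     - lifestyle: Person, no Product
--     - other: Neither detected
--     """
--     labels = [d['name'] for d in detections]
--     product_classes = {'bottle', 'cup', 'bowl', 'vase', 'wine glass', 'box'}
--
--     has_person = 'person' in labels
--     has_product = any(cls in labels for cls in product_classes)
--
--     if has_person and has_product: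
--         return 'promotional'
--     elif has_product:
--         return 'product_display'
--     elif has_person:
--         return 'lifestyle'
--     else:
--         return 'other'
-- ===== SOURCE B (Python) =====
-- _CATEGORY = ('other', 'lifestyle', 'product_display', 'promotional')
--
--
-- def _code(name):
--     """Bit code of one detected label: bit 0 = person, bit 1 = product."""
--     if name == 'person':
--         return 1
--     if name in {'bottle', 'cup', 'bowl', 'vase', 'wine glass', 'box'}:
--         return 2
--     return 0
--
--
-- def categorize_image(detections):
--     """
--     Categorizes the image based on detected objects.
--     - promotional: Person + Product
--     - product_display: Product, no Person
--     - lifestyle: Person, no Product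
--     - other: Neither detected
--     """
--     mask = 0
--     for d in detections:
--         mask |= _code(d['name'])
--     return _CATEGORY[mask]
-- ===== Notes on version B (the rewrite author's own statement) =====
-- stated objective: alternative
-- what changed: B replaces the labels list, the two boolean existence scans and the four-way if/elif chain by OR-accumulating a 2-bit code per detection into a single mask and returning a category table indexed by that mask.
import Mathlib
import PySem

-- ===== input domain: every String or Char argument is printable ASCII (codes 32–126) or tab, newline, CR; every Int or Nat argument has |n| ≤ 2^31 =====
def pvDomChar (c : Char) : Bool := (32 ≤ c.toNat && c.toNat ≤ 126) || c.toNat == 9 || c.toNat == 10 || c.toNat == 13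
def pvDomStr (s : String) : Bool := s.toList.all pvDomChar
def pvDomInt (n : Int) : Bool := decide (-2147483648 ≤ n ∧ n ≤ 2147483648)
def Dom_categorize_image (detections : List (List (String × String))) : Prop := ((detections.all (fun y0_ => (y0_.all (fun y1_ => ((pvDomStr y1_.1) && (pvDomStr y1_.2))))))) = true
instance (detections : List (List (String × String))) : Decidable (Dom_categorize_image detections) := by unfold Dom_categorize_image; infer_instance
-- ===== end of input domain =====

-- B replaces the labels list, the boolean existence scans and the if/elif chain by OR-accumulating
-- a 2-bit code per detection into one mask and indexing a category table (objective: alternative).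

-- ===== PORT A =====
def categorize_image (detections : List (List (String × String))) : String :=
  -- labels = [d['name'] for d in detections]; Pre_ guarantees the key exists (else KeyError)
  let labels := detections.map (fun d => ((PySem.Dict.mk d).get? "name").getD "")
  let product_classes : PySem.Set String :=
    PySem.Set.ofList ["bottle", "cup", "bowl", "vase", "wine glass", "box"]
  let has_person := labels.contains "person"
  let has_product := product_classes.any (fun cls => labels.contains cls)
  if has_person && has_product then "promotional"
  else if has_product then "product_display"
  else if has_person then "lifestyle"
  else "other"

-- ===== PORT B =====
-- _CODE of one label: bit 0 = person, bit 1 = product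
def pvCode (name : String) : Nat :=
  if name == "person" then 1
  else if (PySem.Set.ofList ["bottle", "cup", "bowl", "vase", "wine glass", "box"]).contains name then 2
  else 0

def categorize_image_alt (detections : List (List (String × String))) : String :=
  let mask := detections.foldl
    (fun (m : Nat) d => m ||| pvCode (((PySem.Dict.mk d).get? "name").getD "")) 0
  -- _CATEGORY[mask]; mask ≤ 3 always, so the getD default is never used
  ["other", "lifestyle", "product_display", "promotional"].getD mask "other"

-- ===== PRECONDITION & SPEC =====
-- Pre_ excludes exactly the inputs where some detection dict lacks the 'name' key, on which A raises KeyError.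
def Pre_categorize_image (detections : List (List (String × String))) : Prop :=
  ∀ d ∈ detections, ((PySem.Dict.mk d).get? "name").isSome
instance (detections : List (List (String × String))) : Decidable (Pre_categorize_image detections) := by unfold Pre_categorize_image; infer_instance
def pvWitness_categorize_image : (List (List (String × String))) := [[("name", "person")], [("name", "cup")]]

def Spec_categorize_image (detections : List (List (String × String))) (out : String) : Prop := out = categorize_image_alt detections
instance (detections : List (List (String × String))) (out : String) : Decidable (Spec_categorize_image detections out) := by unfold Spec_categorize_image; infer_instance

-- ===== CLAIM (what is proved, stated in full; the proofs are below) =====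
def Claim_equal_categorize_image : Prop := ∀ (detections : List (List (String × String))), Dom_categorize_image detections → Pre_categorize_image detections → Spec_categorize_image detections (categorize_image detections)

-- ===== LEMMAS AND PROOFS =====

-- pull the fold's accumulator out front
theorem pv_fold_lor (labels : List String) (m : Nat) :
    labels.foldl (fun (m : Nat) l => m ||| pvCode l) m
      = m ||| labels.foldl (fun (m : Nat) l => m ||| pvCode l) 0 := by
  induction labels generalizing m with
  | nil => simp
  | cons l tl ih =>
    simp only [List.foldl_cons]
    rw [ih, ih (0 ||| pvCode l)]
    simp [Nat.or_assoc]

-- pvCode as the lor of a person bit and a product bit ("person" is not a product class)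
theorem pv_code_or (l : String) :
    pvCode l = (if l == "person" then 1 else 0)
      ||| (if (PySem.Set.ofList ["bottle", "cup", "bowl", "vase", "wine glass", "box"]).contains l then 2 else 0) := by
  by_cases hp : l == "person"
  · have : l = "person" := eq_of_beq hp
    subst this
    simp [pvCode]
  · simp [pvCode, hp]

-- lor of two (person-bit ||| product-bit) masks combines the bits disjunctively
theorem pv_bits_or (a b p q : Bool) :
    ((if a then 1 else 0) ||| (if b then 2 else 0)) |||
      ((if p then 1 else 0) ||| (if q then 2 else 0))
    = (if (a || p) then 1 else 0) ||| (if (b || q) then (2 : Nat) else 0) := by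
  cases a <;> cases b <;> cases p <;> cases q <;> rfl

-- the mask computes person/product existence bits
theorem pv_mask_bits (labels : List String) :
    labels.foldl (fun (m : Nat) l => m ||| pvCode l) 0
      = (if labels.contains "person" then 1 else 0)
        ||| (if labels.any (fun l => (PySem.Set.ofList ["bottle", "cup", "bowl", "vase", "wine glass", "box"]).contains l) then 2 else 0) := by
  induction labels with
  | nil => simp
  | cons l tl ih =>
    simp only [List.foldl_cons, Nat.zero_or]
    rw [pv_fold_lor, ih, pv_code_or, pv_bits_or]
    simp only [List.contains_cons, List.any_cons]
    rw [show ("person" == l) = (l == "person") from by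
          by_cases h : l = "person"
          · simp [h]
          · simp [h, (Ne.symm h : ¬"person" = l)]]
    rfl

-- the four-way if/elif chain equals indexing the category table by the 2-bit mask
theorem pv_table (p q : Bool) :
    (if p && q then "promotional"
     else if q then "product_display"
     else if p then "lifestyle"
     else "other")
      = ["other", "lifestyle", "product_display", "promotional"].getD
          ((if p then 1 else 0) ||| (if q then 2 else 0)) "other" := by
  cases p <;> cases q <;> rfl

-- A's scan of the product set over labels equals the per-label set membership
theorem pv_product_comm (labels : List String) :
    (PySem.Set.ofList ["bottle", "cup", "bowl", "vase", "wine glass", "box"]).any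
        (fun cls => labels.contains cls)
      = labels.any (fun l =>
          (PySem.Set.ofList ["bottle", "cup", "bowl", "vase", "wine glass", "box"]).contains l) := by
  rw [Bool.eq_iff_iff]
  simp only [List.any_eq_true, List.contains_eq_mem, PySem.Set.contains,
    decide_eq_true_eq]
  constructor
  · rintro ⟨c, hc, hl⟩; exact ⟨c, by simpa using hl, by simpa using hc⟩
  · rintro ⟨l, hl, hc⟩; exact ⟨l, by simpa using hc, by simpa using hl⟩

-- ===== VERDICT (by name: the statement is the Claim_ definition above) =====
theorem categorize_image_spec : Claim_equal_categorize_image := by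
  intro detections _ _
  unfold Spec_categorize_image categorize_image categorize_image_alt
  rw [show detections.foldl (fun (m : Nat) d => m ||| pvCode (((PySem.Dict.mk d).get? "name").getD "")) 0
        = (detections.map (fun d => ((PySem.Dict.mk d).get? "name").getD "")).foldl
            (fun (m : Nat) l => m ||| pvCode l) 0 from
        (List.foldl_map (f := fun d => ((PySem.Dict.mk d).get? "name").getD "")
          (g := fun (m : Nat) l => m ||| pvCode l)).symm]
  rw [pv_mask_bits]
  simp only [pv_product_comm]
  exact pv_table _ _
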